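-- pv_equiv track=rewrite | github.com/linorcohen/Intro2cs | Exercises/Ex5/check/wordsearch.py | create_diagonal_raise_direction_list
-- ===== SOURCE A (Python) =====
-- def create_diagonal_raise_direction_list(columns, matrix, columns_direction):
--     """
--     This function returns a list of organized matrix lines joined in the
--     direction of diagonal raise left or right according to columns_direction.
--     :param columns: number of columns in matrix
--     :type columns: int
--     :param matrix: 2D list of the matrix letters
--     :type matrix: list[list[str]]
--     :param columns_direction: list of columns direction
--     :type columns_direction: list[int]
--     :return: list of organized matrix lines joined
--     :rtype: list[str]
--     """
--     # [1,2,3]      rise right                  rise left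
--     # [4,5,6] ---> ['1','42','753','86','9'] / ['3','62','951','84','7']
--     # [7,8,9]
--     rows = len(matrix)
--     number_of_diagonals = rows + columns - 1
--     diagonal_matrix = ['' for i in range(number_of_diagonals)]
--     # the code below runs on all the columns in the matrix and adds the letters
--     # to diagonal_matrix for the right diagonal they belong:
--     curr_index = 0   # current index in diagonal_matrix
--     for column in columns_direction:
--         # start adding letters from rows of that column to diagonal_matrix:
--         curr_add_index = curr_index
--         for row in range(rows):
--             diagonal_matrix[curr_add_index] += (matrix[row][column])
--             curr_add_index += 1
--         curr_index += 1  # go to next index in diagonal_matrix for next column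
--
--     return diagonal_matrix
-- ===== SOURCE B (Python) =====
-- def create_diagonal_raise_direction_list(columns, matrix, columns_direction):
--     rows = len(matrix)
--     k = len(columns_direction)
--     result = []
--     for i in range(rows + columns - 1):
--         lo = max(0, i - rows + 1)
--         hi = min(k - 1, i)
--         result.append(''.join(matrix[i - e][columns_direction[e]]
--                               for e in range(lo, hi + 1)))
--     return result
-- ===== Notes on version B (the rewrite author's own statement) =====
-- stated objective: alternative
-- what changed: B iterates over the output diagonals and builds each diagonal string independently with one join over the valid column range, instead of A's preallocated bucket list mutated cell-by-cell while scanning columns then rows.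
import Mathlib
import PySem

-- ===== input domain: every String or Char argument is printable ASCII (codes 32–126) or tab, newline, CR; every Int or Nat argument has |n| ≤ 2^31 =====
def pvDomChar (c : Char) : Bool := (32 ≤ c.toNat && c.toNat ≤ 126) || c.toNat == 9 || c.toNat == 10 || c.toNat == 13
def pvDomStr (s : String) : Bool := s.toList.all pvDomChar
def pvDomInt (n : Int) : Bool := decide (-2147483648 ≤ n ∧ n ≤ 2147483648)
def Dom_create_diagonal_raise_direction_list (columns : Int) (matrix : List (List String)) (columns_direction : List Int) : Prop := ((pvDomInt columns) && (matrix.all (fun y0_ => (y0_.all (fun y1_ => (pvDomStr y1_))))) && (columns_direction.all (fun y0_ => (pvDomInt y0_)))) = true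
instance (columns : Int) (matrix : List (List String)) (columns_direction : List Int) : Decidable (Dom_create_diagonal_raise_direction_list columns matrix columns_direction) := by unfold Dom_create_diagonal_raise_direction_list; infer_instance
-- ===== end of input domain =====

-- ===== PORT A =====
-- Port of A: preallocate one empty string per diagonal, then for each column in
-- columns_direction append the column's letters into consecutive diagonal buckets.
def create_diagonal_raise_direction_list (columns : Int) (matrix : List (List String)) (columns_direction : List Int) : List String :=
  let rows : Int := PySem.List.len matrix
  let number_of_diagonals : Int := rows + columns - 1
  let diagonal_matrix : List String := (PySem.List.pyRange 0 number_of_diagonals 1).map (fun _ => "")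
  let res := columns_direction.foldl
    (fun (st : List String × Int) column =>
      let inner := (PySem.List.pyRange 0 rows 1).foldl
        (fun (st2 : List String × Int) row =>
          (PySem.List.pySetD st2.1 st2.2
             (PySem.List.pyGetD st2.1 st2.2 "" ++
              PySem.List.pyGetD (PySem.List.pyGetD matrix row []) column ""),
           st2.2 + 1))
        (st.1, st.2)
      (inner.1, st.2 + 1))
    (diagonal_matrix, (0 : Int))
  res.1

-- ===== PORT B =====
-- B: build each diagonal string independently, joining the valid anti-slice directly.
def create_diagonal_raise_direction_list_alt (columns : Int) (matrix : List (List String)) (columns_direction : List Int) : List String :=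
  let rows : Int := PySem.List.len matrix
  let k : Int := PySem.List.len columns_direction
  (PySem.List.pyRange 0 (rows + columns - 1) 1).map (fun i =>
    let lo : Int := max 0 (i - rows + 1)
    let hi : Int := min (k - 1) i
    PySem.Str.join "" ((PySem.List.pyRange lo (hi + 1) 1).map (fun e =>
      PySem.List.pyGetD (matrix.getD (i - e).toNat [])
        (columns_direction.getD e.toNat 0) "")))

-- ===== PRECONDITION & SPEC =====
-- Pre_ is exactly the inputs where A returns (no IndexError): either nothing is
-- written (empty matrix or direction list), or every write index fits
-- (len(columns_direction) <= columns) and every column index is valid for every row.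
def Pre_create_diagonal_raise_direction_list (columns : Int) (matrix : List (List String)) (columns_direction : List Int) : Prop :=
  matrix = [] ∨ columns_direction = [] ∨
    (((columns_direction.length : Int) ≤ columns) ∧
      ∀ row ∈ matrix, ∀ c ∈ columns_direction, -(row.length : Int) ≤ c ∧ c < (row.length : Int))
instance (columns : Int) (matrix : List (List String)) (columns_direction : List Int) : Decidable (Pre_create_diagonal_raise_direction_list columns matrix columns_direction) := by unfold Pre_create_diagonal_raise_direction_list; infer_instance

def pvWitness_create_diagonal_raise_direction_list : Int × List (List String) × List Int :=
  (3, [["1","2","3"],["4","5","6"],["7","8","9"]], [0,1,2])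

def Spec_create_diagonal_raise_direction_list (columns : Int) (matrix : List (List String)) (columns_direction : List Int) (out : List String) : Prop := out = create_diagonal_raise_direction_list_alt columns matrix columns_direction
instance (columns : Int) (matrix : List (List String)) (columns_direction : List Int) (out : List String) : Decidable (Spec_create_diagonal_raise_direction_list columns matrix columns_direction out) := by unfold Spec_create_diagonal_raise_direction_list; infer_instance

-- ===== CLAIM (what is proved, stated in full; the proofs are below) =====
def Claim_equal_create_diagonal_raise_direction_list : Prop := ∀ (columns : Int) (matrix : List (List String)) (columns_direction : List Int), Dom_create_diagonal_raise_direction_list columns matrix columns_direction → Pre_create_diagonal_raise_direction_list columns matrix columns_direction → Spec_create_diagonal_raise_direction_list columns matrix columns_direction (create_diagonal_raise_direction_list columns matrix columns_direction)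

-- ===== LEMMAS AND PROOFS =====

/-- Concatenation of a list of strings, as A's repeated `+=` produces it. -/
def pvCat (l : List String) : String := l.foldl (· ++ ·) ""

/-- The pieces contributed to diagonal `j` by the columns `cs` whose first column
has diagonal start index `t`, in column order. -/
def pvPieces (matrix : List (List String)) (cs : List Int) (t j : Nat) : List String :=
  ((List.range cs.length).filter (fun e => decide (t + e ≤ j ∧ j < t + e + matrix.length))).map
    (fun e => PySem.List.pyGetD (matrix.getD (j - (t + e)) []) (cs.getD e 0) "")

lemma pvCat_foldl (l : List String) : ∀ s : String, l.foldl (· ++ ·) s = s ++ pvCat l := by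
  induction l with
  | nil => intro s; simp [pvCat]
  | cons p t ih =>
    intro s
    simp only [pvCat, List.foldl_cons, String.empty_append] at *
    rw [ih (s ++ p), ih p, String.append_assoc]

lemma pvCat_cons (p : String) (l : List String) : pvCat (p :: l) = p ++ pvCat l := by
  simp only [pvCat, List.foldl_cons, String.empty_append]
  rw [pvCat_foldl l p]; rfl

lemma pvCat_append (a b : List String) : pvCat (a ++ b) = pvCat a ++ pvCat b := by
  induction a with
  | nil => simp [pvCat]
  | cons p t ih => simp [pvCat_cons, ih, String.append_assoc]

lemma pvJoin_flatten (l : List (List Char)) : PySem.Chars.join [] l = l.flatten := by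
  induction l with
  | nil => simp [PySem.Chars.join, List.intercalate, List.intersperse]
  | cons a t ih =>
    cases t with
    | nil => simp [PySem.Chars.join, List.intercalate, List.intersperse]
    | cons b r => rw [PySem.Chars.join_cons_cons]; simp_all

lemma pvJoin_eq_pvCat (l : List String) : PySem.Str.join "" l = pvCat l := by
  have hsep : ("" : String).toList = [] := by simp
  induction l with
  | nil => simp [PySem.Str.join, hsep, pvCat]
  | cons p t ih =>
    simp only [PySem.Str.join, hsep, pvJoin_flatten, List.map_cons, List.flatten_cons,
      String.ofList_append, String.ofList_toList] at *
    rw [ih, pvCat_cons]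

lemma pvSelf (dm : List String) : (List.range dm.length).map (fun j => dm.getD j "") = dm := by
  apply List.ext_getElem
  · simp
  · intro j h1 h2
    simp only [List.getElem_map, List.getElem_range]
    rw [List.getD_eq_getElem dm "" (by simpa using h2)]

lemma pvInnerLem (c : Int) (rows' : List (List String)) :
    ∀ (dm : List String) (t : Nat), (rows' = [] ∨ t + rows'.length ≤ dm.length) →
    rows'.foldl (fun (st2 : List String × Int) r =>
        (PySem.List.pySetD st2.1 st2.2
          (PySem.List.pyGetD st2.1 st2.2 "" ++ PySem.List.pyGetD r c ""), st2.2 + 1))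
      (dm, (t : Int))
    = ((List.range dm.length).map (fun j =>
        if t ≤ j ∧ j < t + rows'.length
        then dm.getD j "" ++ PySem.List.pyGetD (rows'.getD (j - t) []) c ""
        else dm.getD j ""), ((t + rows'.length : Nat) : Int)) := by
  induction rows' with
  | nil =>
    intro dm t _
    simp only [List.foldl_nil, List.length_nil, Nat.add_zero]
    have hmap : (List.range dm.length).map (fun j =>
        if t ≤ j ∧ j < t
        then dm.getD j "" ++ PySem.List.pyGetD (([] : List (List String)).getD (j - t) []) c ""
        else dm.getD j "") = dm := by
      conv_rhs => rw [← pvSelf dm]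
      apply List.map_congr_left
      intro j _
      rw [if_neg (by omega)]
    exact Prod.ext_iff.mpr ⟨hmap.symm, rfl⟩
  | cons r rs ih =>
    intro dm t hlen
    have ht : t + (rs.length + 1) ≤ dm.length := by
      rcases hlen with h | h
      · exact absurd h (by simp)
      · simpa using h
    have htlt : t < dm.length := by omega
    simp only [List.foldl_cons]
    have hset : PySem.List.pySetD dm (t : Int)
        (PySem.List.pyGetD dm (t : Int) "" ++ PySem.List.pyGetD r c "")
        = dm.set t (dm.getD t "" ++ PySem.List.pyGetD r c "") := by
      simp
    rw [hset, show ((t : Int) + 1) = ((t + 1 : Nat) : Int) from by push_cast; ring,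
      ih (dm.set t (dm.getD t "" ++ PySem.List.pyGetD r c "")) (t + 1)
        (Or.inr (by simp only [List.length_set]; omega))]
    refine Prod.ext_iff.mpr ⟨?_, by simp only [List.length_cons]; omega⟩
    simp only [List.length_set, List.length_cons]
    apply List.map_congr_left
    intro j hj
    have hjlt : j < dm.length := List.mem_range.mp hj
    by_cases hjt : j = t
    · rw [hjt, if_neg (by omega), if_pos (by omega),
        List.getD_eq_getElem _ "" (by simpa using htlt), List.getElem_set_self (by simpa using htlt),
        Nat.sub_self, List.getD_cons_zero]
    · have hgd : (dm.set t (dm.getD t "" ++ PySem.List.pyGetD r c "")).getD j ""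
          = dm.getD j "" := by
        rw [List.getD_eq_getElem _ "" (by simpa using hjlt),
          List.getD_eq_getElem _ "" hjlt, List.getElem_set_ne (by omega)]
      rw [hgd]
      by_cases hcond : t + 1 ≤ j ∧ j < t + 1 + rs.length
      · rw [if_pos hcond, if_pos (by omega),
          show j - t = (j - (t + 1)) + 1 from by omega, List.getD_cons_succ]
      · rw [if_neg hcond, if_neg (by omega)]

lemma pvPieces_cons (matrix : List (List String)) (c : Int) (cs : List Int) (t j : Nat) :
    pvPieces matrix (c :: cs) t j
    = (if t ≤ j ∧ j < t + matrix.length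
       then [PySem.List.pyGetD (matrix.getD (j - t) []) c ""] else [])
      ++ pvPieces matrix cs (t + 1) j := by
  unfold pvPieces
  rw [List.length_cons, List.range_succ_eq_map, List.filter_cons, List.filter_map]
  have hfc : (List.filter ((fun e => decide (t + e ≤ j ∧ j < t + e + matrix.length)) ∘ Nat.succ)
      (List.range cs.length))
      = List.filter (fun e => decide (t + 1 + e ≤ j ∧ j < t + 1 + e + matrix.length))
        (List.range cs.length) := by
    apply List.filter_congr
    intro e _
    simp only [Function.comp_apply]
    exact decide_eq_decide.mpr (by omega)
  rw [hfc]
  have htail : (List.map (fun e => PySem.List.pyGetD (matrix.getD (j - (t + e)) [])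
        ((c :: cs).getD e 0) "") (List.map Nat.succ
        (List.filter (fun e => decide (t + 1 + e ≤ j ∧ j < t + 1 + e + matrix.length))
          (List.range cs.length))))
      = List.map (fun e => PySem.List.pyGetD (matrix.getD (j - (t + 1 + e)) []) (cs.getD e 0) "")
        (List.filter (fun e => decide (t + 1 + e ≤ j ∧ j < t + 1 + e + matrix.length))
          (List.range cs.length)) := by
    rw [List.map_map]
    apply List.map_congr_left
    intro e _
    simp only [Function.comp_apply, Nat.succ_eq_add_one, List.getD_cons_succ]
    congr 2
    omega
  by_cases h0 : t ≤ j ∧ j < t + matrix.length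
  · rw [if_pos (decide_eq_true (show t + 0 ≤ j ∧ j < t + 0 + matrix.length by omega)),
      if_pos h0, List.map_cons, htail]
    simp only [List.getD_cons_zero, Nat.add_zero, List.cons_append, List.nil_append]
  · rw [if_neg (fun hd => absurd
        (⟨by have := of_decide_eq_true hd; omega, by have := of_decide_eq_true hd; omega⟩ :
          t ≤ j ∧ j < t + matrix.length) h0), if_neg h0, htail, List.nil_append]

lemma pvOuterLem (matrix : List (List String)) (cs : List Int) :
    ∀ (dm : List String) (t : Nat),
    (cs = [] ∨ matrix = [] ∨ t + cs.length + matrix.length ≤ dm.length + 1) →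
    (cs.foldl (fun (st : List String × Int) column =>
        ((matrix.foldl (fun (st2 : List String × Int) r =>
            (PySem.List.pySetD st2.1 st2.2
              (PySem.List.pyGetD st2.1 st2.2 "" ++ PySem.List.pyGetD r column ""), st2.2 + 1))
          (st.1, st.2)).1, st.2 + 1))
      (dm, (t : Int))).1
    = (List.range dm.length).map (fun j => dm.getD j "" ++ pvCat (pvPieces matrix cs t j)) := by
  induction cs with
  | nil =>
    intro dm t _
    simp only [List.foldl_nil]
    have hmap : (List.range dm.length).map (fun j =>
        dm.getD j "" ++ pvCat (pvPieces matrix [] t j)) = dm := by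
      conv_rhs => rw [← pvSelf dm]
      apply List.map_congr_left
      intro j _
      simp [pvPieces, pvCat]
    exact hmap.symm
  | cons c cs ih =>
    intro dm t hlen
    have hlen' : matrix = [] ∨ t + matrix.length ≤ dm.length := by
      rcases hlen with h | h | h
      · exact absurd h (by simp)
      · exact Or.inl h
      · right; simp at h; omega
    simp only [List.foldl_cons]
    rw [pvInnerLem c matrix dm t hlen']
    set dm' := (List.range dm.length).map (fun j =>
      if t ≤ j ∧ j < t + matrix.length
      then dm.getD j "" ++ PySem.List.pyGetD (matrix.getD (j - t) []) c ""
      else dm.getD j "") with hdm'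
    have hlen2 : dm'.length = dm.length := by simp [hdm']
    rw [show ((t : Int) + 1) = ((t + 1 : Nat) : Int) from by push_cast; ring]
    rw [ih dm' (t + 1) (by
      rcases hlen with h | h | h
      · exact absurd h (by simp)
      · exact Or.inr (Or.inl h)
      · right; right; rw [hlen2]; simp only [List.length_cons] at h; omega)]
    rw [hlen2]
    apply List.map_congr_left
    intro j hj
    have hjlt : j < dm.length := List.mem_range.mp hj
    have hgd : dm'.getD j "" = (if t ≤ j ∧ j < t + matrix.length
        then dm.getD j "" ++ PySem.List.pyGetD (matrix.getD (j - t) []) c ""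
        else dm.getD j "") := by
      rw [hdm', List.getD_eq_getElem _ "" (by simpa using hjlt), List.getElem_map,
        List.getElem_range]
    rw [hgd, pvPieces_cons]
    rw [pvCat_append]
    by_cases hc : t ≤ j ∧ j < t + matrix.length
    · rw [if_pos hc, if_pos hc, pvCat_cons]
      simp [pvCat, String.append_assoc]
    · rw [if_neg hc, if_neg hc]
      simp [pvCat]

lemma pvRangeEq (K R j : Nat) :
    PySem.List.pyRange (max 0 ((j : Int) - (R : Int) + 1)) (min ((K : Int) - 1) (j : Int) + 1) 1
    = ((List.range K).filter (fun e => decide (e ≤ j ∧ j < e + R))).map (fun e : Nat => (e : Int)) := by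
  have hinj : Function.Injective (fun e : Nat => (e : Int)) :=
    fun a b h => Int.natCast_inj.mp h
  have hnd2 : (((List.range K).filter (fun e => decide (e ≤ j ∧ j < e + R))).map
      (fun e : Nat => (e : Int))).Nodup :=
    (List.Nodup.filter _ (List.nodup_range)).map hinj
  have hmem : ∀ x : Int, (x ∈ PySem.List.pyRange (max 0 ((j : Int) - (R : Int) + 1))
        (min ((K : Int) - 1) (j : Int) + 1) 1)
      ↔ x ∈ ((List.range K).filter (fun e => decide (e ≤ j ∧ j < e + R))).map
          (fun e : Nat => (e : Int)) := by
    intro x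
    rw [PySem.List.mem_pyRange_one, List.mem_map]
    constructor
    · rintro ⟨h1, h2⟩
      refine ⟨x.toNat, ?_, by omega⟩
      rw [List.mem_filter, List.mem_range]
      exact ⟨by omega, decide_eq_true (by omega)⟩
    · rintro ⟨e, he, rfl⟩
      rw [List.mem_filter, List.mem_range] at he
      have := of_decide_eq_true he.2
      omega
  refine List.Perm.eq_of_pairwise (le := (· ≤ ·))
    (fun a b _ _ h1 h2 => le_antisymm h1 h2) ?_ ?_
    ((List.perm_ext_iff_of_nodup (PySem.List.nodup_pyRange_one _ _) hnd2).mpr hmem)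
  · exact (PySem.List.pairwise_lt_pyRange_one _ _).imp le_of_lt
  · exact ((List.Pairwise.filter _ List.pairwise_lt_range).map
      (fun e : Nat => (e : Int)) (fun {a b} h => by change ((a : Int) ≤ (b : Int)); exact_mod_cast Nat.le_of_lt h)
      : List.Pairwise (· ≤ ·) _)

lemma pvBList (matrix : List (List String)) (cd : List Int) (j : Nat) :
    (PySem.List.pyRange (max 0 ((j : Int) - (matrix.length : Int) + 1))
        (min ((cd.length : Int) - 1) (j : Int) + 1) 1).map
      (fun e => PySem.List.pyGetD (matrix.getD ((j : Int) - e).toNat [])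
        (cd.getD e.toNat 0) "")
    = pvPieces matrix cd 0 j := by
  rw [pvRangeEq cd.length matrix.length j, List.map_map]
  unfold pvPieces
  simp only [Nat.zero_add]
  apply List.map_congr_left
  intro e he
  rw [List.mem_filter, List.mem_range] at he
  have h2 := of_decide_eq_true he.2
  simp only [Function.comp_apply, Int.toNat_natCast]
  have : ((j : Int) - (e : Int)).toNat = j - e := by omega
  rw [this]

-- ===== VERDICT (by name: the statement is the Claim_ definition above) =====
theorem create_diagonal_raise_direction_list_spec : Claim_equal_create_diagonal_raise_direction_list := by
  intro columns matrix cd hdom hpre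
  unfold Spec_create_diagonal_raise_direction_list create_diagonal_raise_direction_list
    create_diagonal_raise_direction_list_alt
  simp only [PySem.List.len_eq]
  have hstep : ∀ (st : List String × Int) (column : Int),
      (PySem.List.pyRange 0 (matrix.length : Int) 1).foldl
        (fun (st2 : List String × Int) row =>
          (PySem.List.pySetD st2.1 st2.2
            (PySem.List.pyGetD st2.1 st2.2 "" ++
             PySem.List.pyGetD (PySem.List.pyGetD matrix row []) column ""), st2.2 + 1))
        (st.1, st.2)
      = matrix.foldl
        (fun (st2 : List String × Int) r =>
          (PySem.List.pySetD st2.1 st2.2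
            (PySem.List.pyGetD st2.1 st2.2 "" ++ PySem.List.pyGetD r column ""), st2.2 + 1))
        (st.1, st.2) := by
    intro st column
    exact PySem.List.foldl_pyRange_zero_pyGetD' matrix []
      (fun st2 r => (PySem.List.pySetD st2.1 st2.2
        (PySem.List.pyGetD st2.1 st2.2 "" ++ PySem.List.pyGetD r column ""), st2.2 + 1))
      (st.1, st.2)
  simp only [hstep]
  set dm0 := (PySem.List.pyRange 0 ((matrix.length : Int) + columns - 1) 1).map
    (fun _ => "") with hdm0
  have hlen0 : dm0.length = ((matrix.length : Int) + columns - 1).toNat := by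
    simp [hdm0, PySem.List.length_pyRange_one]
  have hhyp : cd = [] ∨ matrix = [] ∨ 0 + cd.length + matrix.length ≤ dm0.length + 1 := by
    rcases hpre with h | h | h
    · exact Or.inr (Or.inl h)
    · exact Or.inl h
    · right; right; rw [hlen0]; have hK := h.1; omega
  have hA := pvOuterLem matrix cd dm0 0 hhyp
  simp only [Nat.cast_zero] at hA
  rw [hA]
  rw [PySem.List.pyRange_one 0 ((matrix.length : Int) + columns - 1), List.map_map]
  have hn : ((matrix.length : Int) + columns - 1 - 0).toNat = dm0.length := by
    rw [hlen0]; omega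
  rw [hn]
  apply List.map_congr_left
  intro j hj
  have hjlt : j < dm0.length := List.mem_range.mp hj
  have hgd : dm0.getD j "" = "" := by
    rw [List.getD_eq_getElem _ "" hjlt]
    simp [hdm0]
  simp only [Function.comp_apply, zero_add]
  rw [hgd, String.empty_append, pvJoin_eq_pvCat, pvBList matrix cd j]
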